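-- pv_equiv track=rewrite | github.com/olivier-serris/PLDAC | IC_SAITO/src/Cascade.py | Episode_Where_Tu_ancestor_Tv
-- ===== SOURCE A (Python) =====
-- def Episode_Where_Tu_ancestor_Tv(D,u,v):
--     '''
--     Returns all episode id where t_u<t_v
--     Parameters
--     ----------
--     D : Array
--         Containes All Ds (timed representation of cascades)
--     u : Node
--     v : Node
--     Returns Array of episodes ids
--     '''
--     D_plus = []
--
--     for i,Ds in enumerate(D) :
--         preceding_nodes = []
--         for t in range(0,len(Ds)):
--             if (v in Ds[t]):
--                 if (u in preceding_nodes):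
--                     D_plus.append(i)
--                     break
--             else :
--                 preceding_nodes +=Ds[t]
--     return D_plus
-- ===== SOURCE B (Python) =====
-- def Episode_Where_Tu_ancestor_Tv(D, u, v):
--     out = []
--     for i in range(len(D)):
--         steps = D[i]
--         last_v = -1
--         for t in range(len(steps)):
--             if v in steps[t]:
--                 last_v = t
--         for t in range(last_v):
--             if u in steps[t] and v not in steps[t]:
--                 out.append(i)
--                 break
--     return out
-- ===== Notes on version B (the rewrite author's own statement) =====
-- stated objective: alternative
-- what changed: A makes one forward pass per episode maintaining a growing list of all nodes seen in non-v steps and tests u-membership in it; B makes two staged passes: first find the index of the last step containing v, then scan only the strictly earlier steps for one containing u but not v, with no node accumulator at all.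
import Mathlib
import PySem

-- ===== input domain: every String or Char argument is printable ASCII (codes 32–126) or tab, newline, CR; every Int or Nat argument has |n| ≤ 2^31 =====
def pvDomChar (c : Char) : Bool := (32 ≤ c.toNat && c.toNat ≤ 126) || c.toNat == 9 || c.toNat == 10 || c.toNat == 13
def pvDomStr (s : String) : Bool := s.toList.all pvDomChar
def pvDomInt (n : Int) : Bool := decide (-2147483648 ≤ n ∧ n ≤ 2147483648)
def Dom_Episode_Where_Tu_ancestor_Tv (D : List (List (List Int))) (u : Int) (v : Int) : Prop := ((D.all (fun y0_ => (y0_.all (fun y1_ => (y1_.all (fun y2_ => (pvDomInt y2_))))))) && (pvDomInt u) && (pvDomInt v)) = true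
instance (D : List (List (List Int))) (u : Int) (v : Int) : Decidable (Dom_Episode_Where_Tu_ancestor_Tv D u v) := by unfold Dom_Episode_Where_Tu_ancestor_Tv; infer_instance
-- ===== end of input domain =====

-- B replaces A's one-pass scan with a growing accumulator of preceding nodes by two staged
-- passes per episode: locate the LAST step containing v, then search the strictly earlier
-- steps for one containing u but not v (objective: alternative decomposition).

-- ===== PORT A =====
-- inner loop of A: walk the steps forward, accumulating nodes of non-v steps in `pred`;
-- return true exactly when A's `break`/append fires for this episode
def pvAGo (u v : Int) : List (List Int) → List Int → Bool
  | [], _ => false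
  | s :: rest, pred =>
    if v ∈ s then (if u ∈ pred then true else pvAGo u v rest pred)
    else pvAGo u v rest (pred ++ s)

def Episode_Where_Tu_ancestor_Tv (D : List (List (List Int))) (u : Int) (v : Int) : List Int :=
  D.zipIdx.foldl (fun acc p => if pvAGo u v p.1 [] then acc ++ [(p.2 : Int)] else acc) []

-- ===== PORT B =====
-- B pass 1: `last_v = -1; for t in range(len(steps)): if v in steps[t]: last_v = t`
def pvLastV (v : Int) (steps : List (List Int)) : Int :=
  (List.range steps.length).foldl (fun lv t => if v ∈ steps.getD t [] then (t : Int) else lv) (-1)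

-- B pass 2: `for t in range(last_v): if u in steps[t] and v not in steps[t]: append; break`
-- (Python's range over a negative stop is empty, matched by Int.toNat)
def pvFindU (u v : Int) (steps : List (List Int)) (lastV : Int) : Bool :=
  (List.range lastV.toNat).any (fun t => decide (u ∈ steps.getD t []) && !decide (v ∈ steps.getD t []))

def Episode_Where_Tu_ancestor_Tv_alt (D : List (List (List Int))) (u : Int) (v : Int) : List Int :=
  (List.range D.length).filterMap (fun i =>
    let steps := D.getD i []
    if pvFindU u v steps (pvLastV v steps) then some ((i : Nat) : Int) else none)

-- ===== PRECONDITION & SPEC =====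
def Spec_Episode_Where_Tu_ancestor_Tv (D : List (List (List Int))) (u : Int) (v : Int) (out : List Int) : Prop := out = Episode_Where_Tu_ancestor_Tv_alt D u v
instance (D : List (List (List Int))) (u : Int) (v : Int) (out : List Int) : Decidable (Spec_Episode_Where_Tu_ancestor_Tv D u v out) := by unfold Spec_Episode_Where_Tu_ancestor_Tv; infer_instance

-- ===== CLAIM (what is proved, stated in full; the proofs are below) =====
def Claim_equal_Episode_Where_Tu_ancestor_Tv : Prop := ∀ (D : List (List (List Int))) (u : Int) (v : Int), Dom_Episode_Where_Tu_ancestor_Tv D u v → Spec_Episode_Where_Tu_ancestor_Tv D u v (Episode_Where_Tu_ancestor_Tv D u v)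

-- ===== LEMMAS AND PROOFS =====

-- A's inner loop fires iff some v-step is preceded (strictly) either by u in the initial
-- accumulator or by an earlier step containing u but not v.
theorem pvAGo_iff (u v : Int) : ∀ (steps : List (List Int)) (pred : List Int),
    pvAGo u v steps pred = true ↔ ∃ t, t < steps.length ∧ v ∈ steps.getD t [] ∧
      (u ∈ pred ∨ ∃ s, s < t ∧ u ∈ steps.getD s [] ∧ v ∉ steps.getD s [])
  | [], pred => by simp [pvAGo]
  | a :: rest, pred => by
    by_cases hv : v ∈ a
    · by_cases hu : u ∈ pred
      · simp only [pvAGo, if_pos hv, if_pos hu]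
        constructor
        · intro _; exact ⟨0, by simp, by simpa using hv, Or.inl hu⟩
        · intro _; trivial
      · simp only [pvAGo, if_pos hv, if_neg hu]
        rw [pvAGo_iff u v rest pred]
        constructor
        · rintro ⟨t, ht, hvt, h⟩
          refine ⟨t + 1, by simpa using ht, by simpa using hvt, ?_⟩
          rcases h with h | ⟨s, hs, hus, hvs⟩
          · exact Or.inl h
          · exact Or.inr ⟨s + 1, by omega, by simpa using hus, by simpa using hvs⟩
        · rintro ⟨t, ht, hvt, h⟩
          cases t with
          | zero =>
            rcases h with h | ⟨s, hs, _⟩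
            · exact absurd h hu
            · omega
          | succ t =>
            refine ⟨t, by simpa using ht, by simpa using hvt, ?_⟩
            rcases h with h | ⟨s, hs, hus, hvs⟩
            · exact Or.inl h
            · cases s with
              | zero => exact absurd hv (by simpa using hvs)
              | succ s => exact Or.inr ⟨s, by omega, by simpa using hus, by simpa using hvs⟩
    · simp only [pvAGo, if_neg hv]
      rw [pvAGo_iff u v rest (pred ++ a)]
      constructor
      · rintro ⟨t, ht, hvt, h⟩
        refine ⟨t + 1, by simpa using ht, by simpa using hvt, ?_⟩
        rcases h with h | ⟨s, hs, hus, hvs⟩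
        · rcases List.mem_append.1 h with h | h
          · exact Or.inl h
          · exact Or.inr ⟨0, by omega, by simpa using h, by simpa using hv⟩
        · exact Or.inr ⟨s + 1, by omega, by simpa using hus, by simpa using hvs⟩
      · rintro ⟨t, ht, hvt, h⟩
        cases t with
        | zero => exact absurd (by simpa using hvt) hv
        | succ t =>
          refine ⟨t, by simpa using ht, by simpa using hvt, ?_⟩
          rcases h with h | ⟨s, hs, hus, hvs⟩
          · exact Or.inl (List.mem_append_left _ h)
          · cases s with
            | zero => exact Or.inl (List.mem_append_right _ (by simpa using hus))
            | succ s => exact Or.inr ⟨s, by omega, by simpa using hus, by simpa using hvs⟩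

-- characterisation of B's first pass, stated for the foldl over an arbitrary range length
theorem lastV_aux (v : Int) (steps : List (List Int)) : ∀ n : Nat,
    (-1 ≤ (List.range n).foldl (fun lv t => if v ∈ steps.getD t [] then (t : Int) else lv) (-1)
      ∧ (List.range n).foldl (fun lv t => if v ∈ steps.getD t [] then (t : Int) else lv) (-1) < (n : Int))
    ∧ (0 ≤ (List.range n).foldl (fun lv t => if v ∈ steps.getD t [] then (t : Int) else lv) (-1) →
        v ∈ steps.getD ((List.range n).foldl (fun lv t => if v ∈ steps.getD t [] then (t : Int) else lv) (-1)).toNat [])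
    ∧ (∀ t, t < n → v ∈ steps.getD t [] →
        (t : Int) ≤ (List.range n).foldl (fun lv t => if v ∈ steps.getD t [] then (t : Int) else lv) (-1)) := by
  intro n
  induction n with
  | zero => simp
  | succ n ih =>
    rw [List.range_succ, List.foldl_append]
    rcases ih with ⟨⟨h1, h2⟩, h3, h4⟩
    by_cases hv : v ∈ steps.getD n []
    · simp only [List.foldl_cons, List.foldl_nil, if_pos hv]
      refine ⟨⟨by omega, by omega⟩, fun _ => by simpa using hv, ?_⟩
      intro t ht _; omega
    · simp only [List.foldl_cons, List.foldl_nil, if_neg hv]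
      refine ⟨⟨h1, by omega⟩, h3, ?_⟩
      intro t ht hvt
      rcases Nat.lt_succ_iff_lt_or_eq.1 ht with h | h
      · exact h4 t h hvt
      · exact absurd (h ▸ hvt) hv

theorem pvFindU_iff (u v : Int) (steps : List (List Int)) (lv : Int) :
    pvFindU u v steps lv = true ↔ ∃ t, t < lv.toNat ∧ u ∈ steps.getD t [] ∧ v ∉ steps.getD t [] := by
  simp [pvFindU, List.any_eq_true, List.mem_range]

-- per-episode agreement of A's inner loop with B's two passes
theorem inner_eq (u v : Int) (steps : List (List Int)) :
    pvAGo u v steps [] = pvFindU u v steps (pvLastV v steps) := by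
  rw [Bool.eq_iff_iff, pvAGo_iff, pvFindU_iff]
  rcases lastV_aux v steps steps.length with ⟨⟨_, hlt⟩, hmem, hmax⟩
  unfold pvLastV
  constructor
  · rintro ⟨t, ht, hvt, h⟩
    rcases h with h | ⟨s, hs, hus, hvs⟩
    · simp at h
    · have htle := hmax t ht hvt
      exact ⟨s, by omega, hus, hvs⟩
  · rintro ⟨s, hs, hus, hvs⟩
    have h0 : (0:Int) ≤ (List.range steps.length).foldl (fun lv t => if v ∈ steps.getD t [] then (t : Int) else lv) (-1) := by omega
    refine ⟨((List.range steps.length).foldl (fun lv t => if v ∈ steps.getD t [] then (t : Int) else lv) (-1)).toNat,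
      by omega, hmem h0, Or.inr ⟨s, by omega, hus, hvs⟩⟩

-- A's append-if foldl is a filterMap
theorem foldl_if_filterMap (q : List (List Int) → Bool) :
    ∀ (l : List (List (List Int) × Nat)) (acc : List Int),
      l.foldl (fun acc p => if q p.1 then acc ++ [(p.2 : Int)] else acc) acc
        = acc ++ l.filterMap (fun p => if q p.1 then some ((p.2 : Int)) else none)
  | [], acc => by simp
  | p :: l, acc => by
    by_cases hq : q p.1
    · simp [List.foldl_cons, hq, foldl_if_filterMap q l (acc ++ [(p.2 : Int)])]
    · simp [List.foldl_cons, hq, foldl_if_filterMap q l acc]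

-- a filterMap over zipIdx is a filterMap over the index range
theorem zipIdx_filterMap (q : List (List Int) → Bool) :
    ∀ (D : List (List (List Int))) (k : Nat),
      (D.zipIdx k).filterMap (fun p => if q p.1 then some ((p.2 : Int)) else none)
        = (List.range D.length).filterMap (fun i => if q (D.getD i []) then some (((i + k : Nat)) : Int) else none)
  | [], k => by simp
  | d :: D, k => by
    rw [List.zipIdx_cons, List.length_cons, List.range_succ_eq_map, List.filterMap_cons,
      List.filterMap_cons, List.filterMap_map, zipIdx_filterMap q D (k + 1)]
    have : ((fun i => if q ((d :: D).getD i []) then some (((i + k : Nat)) : Int) else none) ∘ Nat.succ)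
        = fun i => if q (D.getD i []) then some (((i + (k + 1) : Nat)) : Int) else none := by
      funext i
      simp only [Function.comp]
      have : i.succ + k = i + (k + 1) := by omega
      simp [this]
    rw [this]
    by_cases hq : q d <;> simp [hq]

-- ===== VERDICT (by name: the statement is the Claim_ definition above) =====
theorem Episode_Where_Tu_ancestor_Tv_spec : Claim_equal_Episode_Where_Tu_ancestor_Tv := by
  intro D u v _
  unfold Spec_Episode_Where_Tu_ancestor_Tv Episode_Where_Tu_ancestor_Tv Episode_Where_Tu_ancestor_Tv_alt
  rw [foldl_if_filterMap (fun steps => pvAGo u v steps []) D.zipIdx [],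
    zipIdx_filterMap (fun steps => pvAGo u v steps []) D 0]
  simp only [List.nil_append]
  apply List.filterMap_congr
  intro i _
  rw [inner_eq]
  simp
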